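-- pv_equiv track=rewrite | github.com/jvc9109/advent-code-2020 | src/day11.py | assign_rules_2
-- ===== SOURCE A (Python) =====
-- import copy
--
-- def count_occupied_seats(row):
--     count = 0
--     for seat in row:
--         if seat == '#':
--             count += 1
--     return count
--
-- def find_first_seat_in_direction(row, column, structure_data):
--     directions = [(1,0), (-1,0), (0,1), (0,-1), (1,1), (1,-1), (-1,1), (-1,-1)]
--     seat_in_direction = []
--     max_rows = len(structure_data)
--     max_columns = len(structure_data[:][0])
--     for direction in directions:
--         no_seat = True
--         test_row = row
--         test_column = column
--         while no_seat:
--             test_row += direction[0]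
--             test_column += direction[1]
--
--             if test_row < 0 or test_row >= max_rows:
--                 break
--
--             if test_column < 0 or test_column >= max_columns:
--                 break
--
--             if structure_data[test_row][test_column] in ['L', '#']:
--                 seat_in_direction.append(structure_data[test_row][test_column])
--                 no_seat = False
--     return seat_in_direction
--
-- def assign_rules_2(structure_data):
--     result = []
--     for row_number, row in enumerate(structure_data):
--         result_row = copy.deepcopy(row)
--         for column, seat in enumerate(row):
--             if seat == 'L':
--                 seats_directions = find_first_seat_in_direction(row_number, column, structure_data)
--                 if '#' not in seats_directions:
--                     result_row[column] = '#'
--             if seat == '#':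
--                 seats_directions = find_first_seat_in_direction(row_number, column, structure_data)
--                 if count_occupied_seats(seats_directions) >= 5:
--                     result_row[column] = 'L'
--         result.append(result_row)
--     return(result)
-- ===== SOURCE B (Python) =====
-- def assign_rules_2(structure_data):
--     rows = len(structure_data)
--     cols = len(structure_data[0]) if rows else 0
--     directions = ((1, 0), (-1, 0), (0, 1), (0, -1), (1, 1), (1, -1), (-1, 1), (-1, -1))
--     memo = {}
--
--     def first_seat(r, c, dr, dc):
--         # nearest visible seat from (r, c) in direction (dr, dc), memoised per cell
--         path = []
--         while True:
--             key = (r, c, dr, dc)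
--             if key in memo:
--                 val = memo[key]
--                 break
--             path.append(key)
--             r += dr
--             c += dc
--             if not (0 <= r < rows and 0 <= c < cols):
--                 val = None
--                 break
--             cell = structure_data[r][c]
--             if cell == 'L' or cell == '#':
--                 val = cell
--                 break
--         for key in path:
--             memo[key] = val
--         return val
--
--     result = []
--     for rn, row in enumerate(structure_data):
--         new_row = []
--         for cn, seat in enumerate(row):
--             if seat == 'L' or seat == '#':
--                 occ = sum(1 for dr, dc in directions if first_seat(rn, cn, dr, dc) == '#')
--                 if seat == 'L':
--                     new_row.append('#' if occ == 0 else seat)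
--                 else:
--                     new_row.append('L' if occ >= 5 else seat)
--             else:
--                 new_row.append(seat)
--         result.append(new_row)
--     return result
-- ===== Notes on version B (the rewrite author's own statement) =====
-- stated objective: faster
-- what changed: Instead of re-walking all 8 rays from scratch for every seat, B memoises the nearest-visible-seat value per (cell, direction) with an iterative walk that backfills the cache along the walked ray, and computes one occupied-count per cell instead of building and re-scanning a per-cell list.
import Mathlib
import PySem

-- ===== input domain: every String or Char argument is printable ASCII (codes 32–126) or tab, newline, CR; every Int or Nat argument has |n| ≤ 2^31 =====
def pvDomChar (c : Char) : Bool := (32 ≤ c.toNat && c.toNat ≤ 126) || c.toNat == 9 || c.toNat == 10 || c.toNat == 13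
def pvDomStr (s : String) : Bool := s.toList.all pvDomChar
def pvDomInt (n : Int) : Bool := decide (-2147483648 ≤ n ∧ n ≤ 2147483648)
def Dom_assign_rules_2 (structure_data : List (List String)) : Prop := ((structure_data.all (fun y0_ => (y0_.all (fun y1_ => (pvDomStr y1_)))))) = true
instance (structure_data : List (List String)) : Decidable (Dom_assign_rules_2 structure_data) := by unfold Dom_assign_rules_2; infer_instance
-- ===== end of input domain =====

-- B replaces A's per-seat 8-ray rescans by a per-(cell,direction) memoised nearest-visible-seat
-- lookup and a single occupied-count per cell: O(R*C) work instead of O(R*C*(R+C)).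

-- ===== PORT A =====

-- shared literal port of Python's enumerate(xs, k) with Nat indices
def pyEnum {α : Type} (k : Nat) : List α → List (Nat × α)
  | [] => []
  | x :: xs => (k, x) :: pyEnum (k + 1) xs

def count_occupied_seats (row : List String) : Int :=
  row.foldl (fun count seat => if seat = "#" then count + 1 else count) 0

def dirsA : List (Int × Int) := [(1,0), (-1,0), (0,1), (0,-1), (1,1), (1,-1), (-1,1), (-1,-1)]

-- the 'while no_seat' walk of one direction; fuel (maxR+maxC+2) only makes it total — within
-- the grid a walk leaves the bounds after at most maxR+maxC steps, so the fuel never runs out.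
-- grid access is getD; inside Pre_ every access is in range, exactly Python's indexing.
def seekA (g : List (List String)) (maxR maxC : Int) (d : Int × Int) :
    Nat → Int → Int → List String → List String
  | 0, _, _, acc => acc
  | fuel + 1, tr, tc, acc =>
    if tr + d.1 < 0 ∨ maxR ≤ tr + d.1 then acc
    else if tc + d.2 < 0 ∨ maxC ≤ tc + d.2 then acc
    else
      let cell := (g.getD (tr + d.1).toNat []).getD (tc + d.2).toNat ""
      if cell = "L" ∨ cell = "#" then acc ++ [cell]
      else seekA g maxR maxC d fuel (tr + d.1) (tc + d.2) acc

def find_first_seat_in_direction (row column : Int) (g : List (List String)) : List String :=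
  let maxR : Int := g.length
  let maxC : Int := (g.headD []).length    -- structure_data[:][0] is structure_data[0]
  dirsA.foldl (fun acc d => seekA g maxR maxC d (maxR + maxC + 2).toNat row column acc) []

def assign_rules_2 (structure_data : List (List String)) : List (List String) :=
  (pyEnum 0 structure_data).foldl (fun result rp =>
    result ++ [(pyEnum 0 rp.2).foldl (fun result_row cp =>
      let rr1 := if cp.2 = "L" ∧ "#" ∉ find_first_seat_in_direction rp.1 cp.1 structure_data
                 then result_row.set cp.1 "#" else result_row
      if cp.2 = "#" ∧ 5 ≤ count_occupied_seats (find_first_seat_in_direction rp.1 cp.1 structure_data)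
      then rr1.set cp.1 "L" else rr1) rp.2]) []

-- ===== PORT B =====

def dirsB : List (Int × Int) := [(1,0), (-1,0), (0,1), (0,-1), (1,1), (1,-1), (-1,1), (-1,-1)]

-- Source B's first_seat walk (its memo is a pure cache: the recursion computes the same value);
-- same totality fuel as in port A.
def firstSeatB (g : List (List String)) (rows cols : Int) (d : Int × Int) :
    Nat → Int → Int → Option String
  | 0, _, _ => none
  | fuel + 1, r, c =>
    if 0 ≤ r + d.1 ∧ r + d.1 < rows ∧ 0 ≤ c + d.2 ∧ c + d.2 < cols then
      let cell := (g.getD (r + d.1).toNat []).getD (c + d.2).toNat ""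
      if cell = "L" ∨ cell = "#" then some cell
      else firstSeatB g rows cols d fuel (r + d.1) (c + d.2)
    else none

def assign_rules_2_alt (structure_data : List (List String)) : List (List String) :=
  let rows : Int := structure_data.length
  let cols : Int := (structure_data.headD []).length
  (pyEnum 0 structure_data).map (fun rp =>
    (pyEnum 0 rp.2).map (fun cp =>
      if cp.2 = "L" ∨ cp.2 = "#" then
        let occ := (dirsB.filter (fun d =>
          firstSeatB structure_data rows cols d (rows + cols + 2).toNat rp.1 cp.1 = some "#")).length
        if cp.2 = "L" then (if occ = 0 then "#" else cp.2)
        else (if 5 ≤ occ then "L" else cp.2)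
      else cp.2))

-- ===== PRECONDITION & SPEC =====
-- Pre_ excludes grids that have a row shorter than the first row AND contain a seat:
-- there A's fixed-width (len(row 0)) ray scan can raise IndexError; on such grids whose
-- rays happen to miss every short row A returns normally and B agrees (cite in the claim).
def Pre_assign_rules_2 (structure_data : List (List String)) : Prop :=
  (∀ row ∈ structure_data, (structure_data.headD []).length ≤ row.length)
    ∨ (∀ row ∈ structure_data, ∀ s ∈ row, s ≠ "L" ∧ s ≠ "#")
instance (structure_data : List (List String)) : Decidable (Pre_assign_rules_2 structure_data) := by unfold Pre_assign_rules_2; infer_instance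

def pvWitness_assign_rules_2 : List (List String) := [["L", "."], [".", "#"]]

def Spec_assign_rules_2 (structure_data : List (List String)) (out : List (List String)) : Prop := out = assign_rules_2_alt structure_data
instance (structure_data : List (List String)) (out : List (List String)) : Decidable (Spec_assign_rules_2 structure_data out) := by unfold Spec_assign_rules_2; infer_instance

-- ===== CLAIM (what is proved, stated in full; the proofs are below) =====
def Claim_equal_assign_rules_2 : Prop := ∀ (structure_data : List (List String)), Dom_assign_rules_2 structure_data → Pre_assign_rules_2 structure_data → Spec_assign_rules_2 structure_data (assign_rules_2 structure_data)

-- ===== LEMMAS AND PROOFS =====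

-- one directional walk of A appends exactly B's nearest-visible-seat (as a 0/1-element list)
theorem seekA_eq_firstSeatB (g : List (List String)) (maxR maxC : Int) (d : Int × Int) :
    ∀ (fuel : Nat) (tr tc : Int) (acc : List String),
      seekA g maxR maxC d fuel tr tc acc
        = acc ++ (firstSeatB g maxR maxC d fuel tr tc).toList := by
  intro fuel
  induction fuel with
  | zero => intro tr tc acc; simp [seekA, firstSeatB]
  | succ n ih =>
    intro tr tc acc
    by_cases hr : tr + d.1 < 0 ∨ maxR ≤ tr + d.1
    · have hB : ¬(0 ≤ tr + d.1 ∧ tr + d.1 < maxR ∧ 0 ≤ tc + d.2 ∧ tc + d.2 < maxC) := by omega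
      simp [seekA, firstSeatB, hr, hB]
    · by_cases hc : tc + d.2 < 0 ∨ maxC ≤ tc + d.2
      · have hB : ¬(0 ≤ tr + d.1 ∧ tr + d.1 < maxR ∧ 0 ≤ tc + d.2 ∧ tc + d.2 < maxC) := by omega
        simp [seekA, firstSeatB, hr, hc, hB]
      · have hB : 0 ≤ tr + d.1 ∧ tr + d.1 < maxR ∧ 0 ≤ tc + d.2 ∧ tc + d.2 < maxC := by omega
        simp only [seekA, firstSeatB, if_neg hr, if_neg hc, if_pos hB]
        split
        · simp
        · simp [ih]

-- A's seat list over all 8 directions, as a flatMap of B's walks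
theorem find_eq_flatMap (row column : Int) (g : List (List String)) :
    find_first_seat_in_direction row column g
      = dirsA.flatMap (fun d =>
          (firstSeatB g (g.length : Int) ((g.headD []).length : Int) d
            (((g.length : Int) + ((g.headD []).length : Int) + 2)).toNat row column).toList) := by
  simp only [find_first_seat_in_direction]
  rw [show (fun (acc : List String) (d : Int × Int) =>
        seekA g (g.length : Int) ((g.headD []).length : Int) d
          (((g.length : Int) + ((g.headD []).length : Int) + 2)).toNat row column acc)
      = (fun acc d =>
        acc ++ (firstSeatB g (g.length : Int) ((g.headD []).length : Int) d
          (((g.length : Int) + ((g.headD []).length : Int) + 2)).toNat row column).toList)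
    from by funext acc d; rw [seekA_eq_firstSeatB]]
  exact PySem.List.foldl_append_eq_flatMap _ _ _

theorem countOcc_flatMap (xs : List (Int × Int)) (f : (Int × Int) → Option String) :
    count_occupied_seats (xs.flatMap (fun d => (f d).toList))
      = ((xs.filter (fun d => f d = some "#")).length : Int) := by
  unfold count_occupied_seats
  rw [PySem.List.foldl_ite_add_one]
  have h : ∀ ys : List (Int × Int),
      (ys.flatMap (fun d => (f d).toList)).countP (fun s => decide (s = "#"))
        = (ys.filter (fun d => f d = some "#")).length := by
    intro ys
    induction ys with
    | nil => simp
    | cons x xs ih =>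
      simp only [List.flatMap_cons, List.countP_append, List.filter_cons, ih]
      cases hfx : f x with
      | none => simp
      | some a =>
        by_cases ha : a = "#"
        · simp [ha]; omega
        · simp [ha]
  rw [h]
  omega

theorem mem_flatMap_iff (xs : List (Int × Int)) (f : (Int × Int) → Option String) :
    "#" ∉ xs.flatMap (fun d => (f d).toList)
      ↔ (xs.filter (fun d => f d = some "#")).length = 0 := by
  simp [List.mem_flatMap, List.length_eq_zero_iff, List.filter_eq_nil_iff]

theorem hk_lt (l : List String) (k : Nat) (s : String) (h : l[k]? = some s) : k < l.length := by
  by_contra hc; rw [List.getElem?_eq_none (by omega)] at h; simp at h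

theorem set_self (l : List String) (k : Nat) (s : String) (h : l[k]? = some s) : l.set k s = l := by
  apply List.ext_getElem?; intro i
  by_cases hik : i = k
  · subst hik
    have hlt := hk_lt l i s h
    rw [List.getElem?_set_self', h]
    simp [List.getElem?_eq_getElem hlt] at h
    simp [← h]
  · rw [List.getElem?_set_ne (by omega)]

theorem take_set (l : List String) (k : Nat) (v : String) (h : k < l.length) :
    (l.set k v).take (k+1) = l.take k ++ [v] := by
  rw [List.set_eq_take_append_cons_drop, if_pos h, List.take_append]
  simp [List.length_take, Nat.min_eq_left (le_of_lt h), List.take_take]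

-- the per-cell new value both programs compute
def newSeat (g : List (List String)) (rn cn : Nat) (seat : String) : String :=
  if seat = "L" ∧ "#" ∉ find_first_seat_in_direction rn cn g then "#"
  else if seat = "#" ∧ 5 ≤ count_occupied_seats (find_first_seat_in_direction rn cn g) then "L"
  else seat

theorem step_set (g : List (List String)) (rn : Nat) (rr : List String) (k : Nat) (s : String)
    (h : rr[k]? = some s) :
    (let rr1 := if s = "L" ∧ "#" ∉ find_first_seat_in_direction rn k g
                then rr.set k "#" else rr
     if s = "#" ∧ 5 ≤ count_occupied_seats (find_first_seat_in_direction rn k g)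
     then rr1.set k "L" else rr1)
      = rr.set k (newSeat g rn k s) := by
  unfold newSeat
  by_cases h1 : s = "L" ∧ "#" ∉ find_first_seat_in_direction rn k g
  · have h2 : ¬(s = "#" ∧ 5 ≤ count_occupied_seats (find_first_seat_in_direction rn k g)) := by
      rintro ⟨h2, -⟩; rw [h1.1] at h2; exact absurd h2 (by decide)
    simp [h1]
  · by_cases h2 : s = "#" ∧ 5 ≤ count_occupied_seats (find_first_seat_in_direction rn k g)
    · simp [h2]
    · simp [h1, h2, set_self rr k s h]

theorem foldl_set_eq_map (g : List (List String)) (rn : Nat) :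
    ∀ (tail : List String) (k : Nat) (rr : List String), rr.drop k = tail →
      (pyEnum k tail).foldl (fun result_row cp =>
        let rr1 := if cp.2 = "L" ∧ "#" ∉ find_first_seat_in_direction rn cp.1 g
                   then result_row.set cp.1 "#" else result_row
        if cp.2 = "#" ∧ 5 ≤ count_occupied_seats (find_first_seat_in_direction rn cp.1 g)
        then rr1.set cp.1 "L" else rr1) rr
        = rr.take k ++ (pyEnum k tail).map (fun cp => newSeat g rn cp.1 cp.2) := by
  intro tail
  induction tail with
  | nil =>
    intro k rr h
    simp only [pyEnum, List.foldl_nil, List.map_nil, List.append_nil]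
    rw [List.take_of_length_le (List.drop_eq_nil_iff.mp h)]
  | cons s ts ih =>
    intro k rr h
    have hk : rr[k]? = some s := by
      have := congrArg (fun t => t[0]?) h
      simpa [List.getElem?_drop] using this
    have hlt : k < rr.length := hk_lt rr k s hk
    have hdrop : rr.drop (k + 1) = ts := by
      have := congrArg List.tail h
      simpa [List.tail_drop] using this
    simp only [pyEnum, List.foldl_cons, List.map_cons]
    rw [step_set g rn rr k s hk]
    rw [ih (k + 1) (rr.set k (newSeat g rn k s))
        (by rw [List.drop_set_of_lt (by omega)]; exact hdrop)]
    rw [take_set rr k _ hlt]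
    simp [List.append_assoc]

theorem newSeat_eq_alt (g : List (List String)) (rn cn : Nat) (seat : String) :
    newSeat g rn cn seat
      = (if seat = "L" ∨ seat = "#" then
          let occ := (dirsB.filter (fun d =>
            firstSeatB g (g.length : Int) ((g.headD []).length : Int) d
              (((g.length : Int) + ((g.headD []).length : Int) + 2)).toNat rn cn = some "#")).length
          if seat = "L" then (if occ = 0 then "#" else seat)
          else (if 5 ≤ occ then "L" else seat)
        else seat) := by
  unfold newSeat
  rw [find_eq_flatMap, countOcc_flatMap]
  simp only [mem_flatMap_iff]
  have hd : dirsB = dirsA := rfl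
  rw [hd]
  set n := (dirsA.filter (fun d =>
      firstSeatB g (g.length : Int) ((g.headD []).length : Int) d
        (((g.length : Int) + ((g.headD []).length : Int) + 2)).toNat rn cn = some "#")).length with hn
  by_cases hL : seat = "L"
  · subst hL
    by_cases h0 : n = 0 <;> simp [h0]
  · by_cases hH : seat = "#"
    · subst hH
      by_cases h5 : 5 ≤ n
      · have h5' : (5 : Int) ≤ (n : Int) := by exact_mod_cast h5
        simp [h5, h5']
      · have h5' : ¬(5 : Int) ≤ (n : Int) := by exact_mod_cast h5
        simp [h5, h5']
    · simp [hL, hH]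

-- ===== VERDICT (by name: the statement is the Claim_ definition above) =====
theorem assign_rules_2_spec : Claim_equal_assign_rules_2 := by
  intro g _ _
  unfold Spec_assign_rules_2 assign_rules_2 assign_rules_2_alt
  rw [PySem.List.foldl_append_singleton_eq_map]
  simp only [List.nil_append]
  refine List.map_congr_left ?_
  intro rp _
  rw [foldl_set_eq_map g rp.1 rp.2 0 rp.2 rfl]
  simp only [List.take_zero, List.nil_append]
  refine List.map_congr_left ?_
  intro cp _
  exact newSeat_eq_alt g rp.1 cp.1 cp.2
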